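-- pv_equiv track=rewrite | github.com/itspragyangit/Duck-number | Checkig Duck.py | isDuck
-- ===== SOURCE A (Python) =====
-- def isDuck(num):
--     if num == 0:
--         return False
--     else:
--         while num > 0:
--             if num % 10 == 0:
--                 return True
--             num = num // 10
--     return False
-- ===== SOURCE B (Python) =====
-- def isDuck(num):
--     return num > 0 and '0' in str(num)
-- ===== Notes on version B (the rewrite author's own statement) =====
-- stated objective: idiomatic
-- what changed: Replaces the arithmetic digit-extraction loop (repeated %10 and //10) with a single string-membership test '0' in str(num), guarded by num > 0 so non-positive inputs stay False as in A.
import Mathlib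
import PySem

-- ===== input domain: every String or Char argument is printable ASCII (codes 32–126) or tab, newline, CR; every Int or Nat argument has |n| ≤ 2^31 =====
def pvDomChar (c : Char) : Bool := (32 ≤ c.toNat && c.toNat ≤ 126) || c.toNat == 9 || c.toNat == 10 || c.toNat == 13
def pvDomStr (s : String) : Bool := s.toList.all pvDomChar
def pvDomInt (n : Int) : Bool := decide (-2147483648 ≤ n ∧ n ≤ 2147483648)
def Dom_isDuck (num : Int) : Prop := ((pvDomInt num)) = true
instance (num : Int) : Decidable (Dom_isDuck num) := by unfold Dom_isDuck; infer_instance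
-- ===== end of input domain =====

-- B replaces A's arithmetic digit loop by the idiomatic test `num > 0 and '0' in str(num)`.

-- ===== PORT A =====
-- the 'while num > 0' loop of A, as structural recursion on num
def isDuckLoop (num : Int) : Bool :=
  if h : 0 < num then
    if PySem.Int.mod num 10 = 0 then true
    else isDuckLoop (PySem.Int.floordiv num 10)
  else false
termination_by num.toNat
decreasing_by
  have hfd : Int.fdiv num 10 = num / 10 := Int.fdiv_eq_ediv_of_nonneg _ (by norm_num)
  simp [PySem.Int.floordiv, hfd]
  omega

def isDuck (num : Int) : Bool :=
  if num = 0 then false else isDuckLoop num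

-- ===== PORT B =====
def isDuck_alt (num : Int) : Bool :=
  decide (0 < num) && (PySem.Int.toStr num).toList.contains '0'

-- ===== PRECONDITION & SPEC =====
def Spec_isDuck (num : Int) (out : Bool) : Prop := out = isDuck_alt num
instance (num : Int) (out : Bool) : Decidable (Spec_isDuck num out) := by unfold Spec_isDuck; infer_instance

-- ===== CLAIM (what is proved, stated in full; the proofs are below) =====
def Claim_equal_isDuck : Prop := ∀ (num : Int), Dom_isDuck num → Spec_isDuck num (isDuck num)

-- ===== LEMMAS AND PROOFS =====

-- Nat mirror of A's digit loop
def hzN (n : Nat) : Bool :=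
  if n = 0 then false
  else if n % 10 = 0 then true
  else hzN (n / 10)

theorem isDuckLoop_eq_hzN (n : Int) (h : 0 ≤ n) : isDuckLoop n = hzN n.toNat := by
  induction n using isDuckLoop.induct with
  | case1 n hpos hmod =>
    rw [isDuckLoop, dif_pos hpos, if_pos hmod]
    rw [hzN]
    have h0 : n.toNat ≠ 0 := by omega
    have hm : n.toNat % 10 = 0 := by
      have : n.fmod 10 = n % 10 := by rw [Int.fmod_eq_emod_of_nonneg]; omega
      simp [PySem.Int.mod, this] at hmod
      omega
    simp [h0, hm]
  | case2 n hpos hmod ih =>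
    rw [isDuckLoop, dif_pos hpos, if_neg hmod]
    rw [hzN]
    have h0 : n.toNat ≠ 0 := by omega
    have hm : ¬ n.toNat % 10 = 0 := by
      have : n.fmod 10 = n % 10 := by rw [Int.fmod_eq_emod_of_nonneg]; omega
      simp [PySem.Int.mod, this] at hmod
      omega
    have hfd : PySem.Int.floordiv n 10 = ((n.toNat / 10 : Nat) : Int) := by
      have : Int.fdiv n 10 = n / 10 := Int.fdiv_eq_ediv_of_nonneg _ (by norm_num)
      simp [PySem.Int.floordiv, this]
      omega
    rw [hfd] at ih
    have hrec := ih (Int.natCast_nonneg _)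
    simp only [Int.toNat_natCast] at hrec
    rw [hfd, hrec]
    simp [h0, hm]
  | case3 n hpos =>
    rw [isDuckLoop, dif_neg hpos, hzN]
    have : n.toNat = 0 := by omega
    simp [this]

theorem isDuckLoop_neg (n : Int) (h : n < 0) : isDuckLoop n = false := by
  rw [isDuckLoop]
  simp
  omega

theorem digitChar_eq_zero_iff (d : Nat) (hd : d < 10) : Nat.digitChar d = '0' ↔ d = 0 := by
  interval_cases d <;> simp [Nat.digitChar]

-- '0' appears among the emitted digit characters iff some digit of n is 0
theorem mem_toDigitsCore (fuel n : Nat) (ds : List Char) (hf : n < fuel) :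
    ('0' ∈ Nat.toDigitsCore 10 fuel n ds) ↔ ((n % 10 = 0 ∨ hzN (n / 10) = true) ∨ '0' ∈ ds) := by
  induction fuel generalizing n ds with
  | zero => omega
  | succ f ih =>
    rw [Nat.toDigitsCore]
    by_cases hq : n / 10 = 0
    · rw [if_pos hq]
      have hd := digitChar_eq_zero_iff (n % 10) (Nat.mod_lt _ (by norm_num))
      simp [hq, hzN, List.mem_cons, eq_comm (a := '0'), hd]
    · rw [if_neg hq]
      have hlt : n / 10 < f := by omega
      rw [ih (n / 10) _ hlt]
      have : hzN (n / 10) = ((n / 10 % 10 = 0 : Bool) || hzN (n / 10 / 10)) := by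
        rw [hzN]
        by_cases h : n / 10 % 10 = 0 <;> simp [hq, h]
      have hd := digitChar_eq_zero_iff (n % 10) (Nat.mod_lt _ (by norm_num))
      simp only [this, List.mem_cons, eq_comm (a := '0'), hd, Bool.or_eq_true, decide_eq_true_eq]
      tauto

theorem hzN_iff_mem_toDigits (n : Nat) (hn : 0 < n) :
    hzN n = true ↔ '0' ∈ Nat.toDigits 10 n := by
  rw [Nat.toDigits, mem_toDigitsCore (n + 1) n [] (by omega)]
  rw [hzN]
  have h0 : n ≠ 0 := by omega
  by_cases h : n % 10 = 0 <;> simp [h0, h]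

-- ===== VERDICT (by name: the statement is the Claim_ definition above) =====
theorem isDuck_spec : Claim_equal_isDuck := by
  intro num _
  unfold Spec_isDuck isDuck isDuck_alt
  rcases lt_trichotomy num 0 with hneg | hz | hpos
  · rw [if_neg (by omega), isDuckLoop_neg num hneg]
    simp [show ¬ (0 < num) by omega]
  · simp [hz]
  · rw [if_neg (by omega), isDuckLoop_eq_hzN num (by omega)]
    have hpos' : 0 < num.toNat := by omega
    have hstr : (PySem.Int.toStr num).toList = Nat.toDigits 10 num.toNat := by
      rw [PySem.Int.toList_toStr]
      simp [PySem.Int.toChars, show ¬ (num < 0) by omega]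
    rw [hstr]
    by_cases h : hzN num.toNat = true
    · simp [h, hpos, (hzN_iff_mem_toDigits num.toNat hpos').mp h]
    · simp at h
      have : '0' ∉ Nat.toDigits 10 num.toNat := fun hc =>
        by simp [(hzN_iff_mem_toDigits num.toNat hpos').mpr hc] at h
      simp [h, this]
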